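-- pv_equiv track=rewrite | github.com/paulauus/Advent-of-Code | 2015/day_3.py | distributing_with_robot
-- ===== SOURCE A (Python) =====
-- def distributing_with_robot(data:str) -> tuple:
--     """Creates a list for Santa and a list for the robot."""
--     santa_houses = [(0, 0)]
--     robot_houses = [(0, 0)]
--     santa_start = [0, 0]
--     robot_start = [0, 0]
--
--     for i, direction in enumerate(data):
--         if i % 2 == 0:
--             if direction == "^":
--                 santa_start[1] += 1
--             elif direction == "v":
--                 santa_start[1] -= 1
--             elif direction == "<":
--                 santa_start[0] -= 1
--             elif direction == ">":
--                 santa_start[0] += 1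
--             santa_houses.append(tuple(santa_start))
--         else:
--             if direction == "^":
--                 robot_start[1] += 1
--             elif direction == "v":
--                 robot_start[1] -= 1
--             elif direction == "<":
--                 robot_start[0] -= 1
--             elif direction == ">":
--                 robot_start[0] += 1
--             robot_houses.append(tuple(robot_start))
--
--     return santa_houses, robot_houses
-- ===== SOURCE B (Python) =====
-- def distributing_with_robot(data: str) -> tuple:
--     """Creates a list for Santa and a list for the robot."""
--     delta = {"^": (0, 1), "v": (0, -1), "<": (-1, 0), ">": (1, 0)}
--
--     def walk(chars):
--         x, y = 0, 0
--         houses = [(0, 0)]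
--         for c in chars:
--             dx, dy = delta.get(c, (0, 0))
--             x, y = x + dx, y + dy
--             houses.append((x, y))
--         return houses
--
--     return walk(data[::2]), walk(data[1::2])
-- ===== Notes on version B (the rewrite author's own statement) =====
-- stated objective: simpler
-- what changed: B splits the input into Santa's stream data[::2] and the robot's data[1::2] and runs one shared delta-dictionary walk per stream, replacing A's single indexed loop with parity branching and two four-way if/elif chains.
import Mathlib
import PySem

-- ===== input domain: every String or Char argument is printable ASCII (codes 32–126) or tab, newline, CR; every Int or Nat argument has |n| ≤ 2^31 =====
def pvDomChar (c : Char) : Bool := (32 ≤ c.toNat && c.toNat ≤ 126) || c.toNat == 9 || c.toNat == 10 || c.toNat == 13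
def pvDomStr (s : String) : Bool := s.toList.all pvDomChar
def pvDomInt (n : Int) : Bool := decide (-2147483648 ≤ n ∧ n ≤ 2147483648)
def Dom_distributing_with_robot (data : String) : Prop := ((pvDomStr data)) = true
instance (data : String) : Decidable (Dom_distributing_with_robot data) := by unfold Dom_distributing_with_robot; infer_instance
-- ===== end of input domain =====

-- B replaces A's parity-branching indexed loop by one shared walk run on the two interleaved streams; objective: simpler.

-- ===== PORT A =====
-- A's for-loop over enumerate(data): state (santa_houses, robot_houses, santa_start, robot_start), index i.
def pvALoop : List Char → Nat → List (Int × Int) → List (Int × Int) → (Int × Int) → (Int × Int) →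
    (List (Int × Int)) × (List (Int × Int))
  | [], _, sh, rh, _, _ => (sh, rh)
  | direction :: rest, i, sh, rh, sp, rp =>
    if i % 2 == 0 then
      let sp' :=
        if direction == '^' then (sp.1, sp.2 + 1)
        else if direction == 'v' then (sp.1, sp.2 - 1)
        else if direction == '<' then (sp.1 - 1, sp.2)
        else if direction == '>' then (sp.1 + 1, sp.2)
        else sp
      pvALoop rest (i + 1) (sh ++ [sp']) rh sp' rp
    else
      let rp' :=
        if direction == '^' then (rp.1, rp.2 + 1)
        else if direction == 'v' then (rp.1, rp.2 - 1)
        else if direction == '<' then (rp.1 - 1, rp.2)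
        else if direction == '>' then (rp.1 + 1, rp.2)
        else rp
      pvALoop rest (i + 1) sh (rh ++ [rp']) sp rp'

def distributing_with_robot (data : String) : (List (Int × Int)) × (List (Int × Int)) :=
  pvALoop data.toList 0 [(0, 0)] [(0, 0)] (0, 0) (0, 0)

-- ===== PORT B =====
def pvDelta : PySem.Dict Char (Int × Int) :=
  PySem.Dict.ofList [('^', (0, 1)), ('v', (0, -1)), ('<', (-1, 0)), ('>', (1, 0))]

def pvWalk : List Char → Int → Int → List (Int × Int)
  | [], _, _ => []
  | c :: cs, x, y =>
    let d := pvDelta.getD c (0, 0)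
    (x + d.1, y + d.2) :: pvWalk cs (x + d.1) (y + d.2)

-- hand port of the extended slice xs[::2] (PySem.List.slice has no step): every second element
def pvEveryOther : List Char → List Char
  | [] => []
  | [c] => [c]
  | c :: _ :: cs => c :: pvEveryOther cs

def distributing_with_robot_alt (data : String) : (List (Int × Int)) × (List (Int × Int)) :=
  ((0, 0) :: pvWalk (pvEveryOther data.toList) 0 0,          -- walk(data[::2])
   (0, 0) :: pvWalk (pvEveryOther data.toList.tail) 0 0)     -- walk(data[1::2])

-- ===== PRECONDITION & SPEC =====
def Spec_distributing_with_robot (data : String) (out : (List (Int × Int)) × (List (Int × Int))) : Prop := out = distributing_with_robot_alt data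
instance (data : String) (out : (List (Int × Int)) × (List (Int × Int))) : Decidable (Spec_distributing_with_robot data out) := by unfold Spec_distributing_with_robot; infer_instance

-- ===== CLAIM (what is proved, stated in full; the proofs are below) =====
def Claim_equal_distributing_with_robot : Prop := ∀ (data : String), Dom_distributing_with_robot data → Spec_distributing_with_robot data (distributing_with_robot data)

-- ===== LEMMAS AND PROOFS =====

theorem pvEveryOther_cons (c : Char) (cs : List Char) :
    pvEveryOther (c :: cs) = c :: pvEveryOther cs.tail := by
  cases cs <;> simp [pvEveryOther]

-- A's four-way if/elif chain computes exactly the delta-dictionary step of B.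
theorem pvMove_eq (p : Int × Int) (c : Char) :
    (if c = '^' then (p.1, p.2 + 1)
     else if c = 'v' then (p.1, p.2 - 1)
     else if c = '<' then (p.1 - 1, p.2)
     else if c = '>' then (p.1 + 1, p.2)
     else p)
    = (p.1 + (pvDelta.getD c (0, 0)).1, p.2 + (pvDelta.getD c (0, 0)).2) := by
  have hd : pvDelta = ⟨[('^', (0, 1)), ('v', (0, -1)), ('<', (-1, 0)), ('>', (1, 0))]⟩ := by decide
  rw [hd]
  split_ifs with h1 h2 h3 h4
  · subst h1; simp [PySem.Dict.getD, PySem.Dict.get?_mk_cons]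
  · subst h2; simp [PySem.Dict.getD, PySem.Dict.get?_mk_cons, sub_eq_add_neg]
  · subst h3; simp [PySem.Dict.getD, PySem.Dict.get?_mk_cons, sub_eq_add_neg]
  · subst h4; simp [PySem.Dict.getD, PySem.Dict.get?_mk_cons]
  · simp [PySem.Dict.getD, PySem.Dict.get?_mk_cons, PySem.Dict.get?,
      Ne.symm h1, Ne.symm h2, Ne.symm h3, Ne.symm h4]

theorem pvALoop_eq (cs : List Char) : ∀ (i : Nat) (sh rh : List (Int × Int)) (sp rp : Int × Int),
    pvALoop cs i sh rh sp rp =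
      if i % 2 == 0 then
        (sh ++ pvWalk (pvEveryOther cs) sp.1 sp.2, rh ++ pvWalk (pvEveryOther cs.tail) rp.1 rp.2)
      else
        (sh ++ pvWalk (pvEveryOther cs.tail) sp.1 sp.2, rh ++ pvWalk (pvEveryOther cs) rp.1 rp.2) := by
  induction cs with
  | nil => intro i sh rh sp rp; simp [pvALoop, pvEveryOther, pvWalk]
  | cons c cs ih =>
    intro i sh rh sp rp
    rw [pvALoop]
    by_cases hi : i % 2 = 0
    · have hi1 : ¬ (i + 1) % 2 = 0 := by omega
      simp only [hi, hi1, beq_iff_eq, if_pos, if_false, ih]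
      rw [pvMove_eq]
      simp [pvEveryOther_cons, pvWalk]
    · have hi1 : (i + 1) % 2 = 0 := by omega
      simp only [hi, hi1, beq_iff_eq, if_pos, if_false, ih]
      rw [pvMove_eq]
      simp [pvEveryOther_cons, pvWalk]

-- ===== VERDICT (by name: the statement is the Claim_ definition above) =====
theorem distributing_with_robot_spec : Claim_equal_distributing_with_robot := by
  intro data _
  unfold Spec_distributing_with_robot distributing_with_robot distributing_with_robot_alt
  rw [pvALoop_eq]
  simp
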